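-- pv_equiv track=rewrite | github.com/cwb14/PrinTE | prinTE/util/nest_inserter_old.py | count_intact_TE_count
-- ===== SOURCE A (Python) =====
-- def partial_name_match(name1, name2):
--     """
--     Check if one name is a partial match of the other.
--     Both names must have at least one supplemental info field (i.e. contain a semicolon).
--     A partial match is defined as one name being a prefix of the other when split by ';'.
--     For example:
--       name1 = "ATCOPIA34#LTR/Copia~LTRlen:246;NESTED_IN:ATLINE1_12#LINE/L1;CUT_BY:Os0007_Castaway#MITE/Tourist;CUT_BY:Os3447_LTR#LTR/Copia"
--       name2 = "ATCOPIA34#LTR/Copia~LTRlen:246;NESTED_IN:ATLINE1_12#LINE/L1;CUT_BY:Os0007_Castaway#MITE/Tourist"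
--     Here, name2 is a prefix of name1.
--     """
--     if ';' not in name1 or ';' not in name2:
--         return False  # Both must have supplemental info.
--     parts1 = name1.split(';')
--     parts2 = name2.split(';')
--     # Check if the smaller list is a prefix of the larger one.
--     if len(parts1) <= len(parts2) and parts1 == parts2[:len(parts1)]:
--         return True
--     elif len(parts2) < len(parts1) and parts2 == parts1[:len(parts2)]:
--         return True
--     return False
--
-- def count_intact_TE_count(features):
--     """
--     Count the number of intact TE features from the input BED (features list) based on the following rules:
--       (1) If the feature ID (i.e. the part of NAME before the first semicolon) contains 'gene' (case-insensitive),
--           then it is NOT an intact TE.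
--       (2) If the first supplemental info (i.e. the text after the first semicolon) contains 'CUT_BY',
--           then it is NOT an intact TE.
--       (3) If there is at least one supplemental info field (i.e. at least one semicolon in the NAME)
--           and an identical or partial (prefix) NAME occurs within 100 lines in the BED (with an identical TSD and strand),
--           then it is NOT an intact TE.
--       (4) If the feature ID (NAME before the first semicolon) contains '_SOLO', then it is NOT an intact TE.
--     """
--     n = len(features)
--     intact_flags = [True] * n
--
--     # Rule 1: Exclude features whose feature ID (before first semicolon) contains "gene"
--     for i, feat in enumerate(features):
--         feature_id = feat['name'].split(';')[0]
--         if 'gene' in feature_id.lower():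
--             intact_flags[i] = False
--
--     # Rule 4: Exclude features whose feature ID (before first semicolon) contains "_SOLO"
--     for i, feat in enumerate(features):
--         feature_id = feat['name'].split(';')[0]
--         if "_SOLO" in feature_id:
--             intact_flags[i] = False
--
--     # Rule 2: Exclude features where the first supplemental field contains "CUT_BY"
--     for i, feat in enumerate(features):
--         if intact_flags[i]:
--             parts = feat['name'].split(';')
--             if len(parts) > 1:
--                 if 'CUT_BY' in parts[1]:
--                     intact_flags[i] = False
--
--     # Rule 3: For features with one or more supplemental info fields,
--     # if another feature (within 100 lines before or after) has an identical TSD,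
--     # identical strand, and a NAME that is an exact or partial (prefix) match, mark as not intact.
--     for i, feat in enumerate(features):
--         if not intact_flags[i]:
--             continue
--         parts = feat['name'].split(';')
--         if len(parts) <= 1:
--             continue  # No supplemental info; skip rule 3.
--         window_start = max(0, i - 100)
--         window_end = min(n, i + 101)
--         for j in range(window_start, window_end):
--             if j == i:
--                 continue
--             other = features[j]
--             if (feat['tsd'] == other['tsd'] and
--                 feat['strand'] == other['strand'] and
--                 partial_name_match(feat['name'], other['name'])):
--                 intact_flags[i] = False
--                 break
--
--     count = sum(1 for flag in intact_flags if flag)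
--     return count
-- ===== SOURCE B (Python) =====
-- def count_intact_TE_count(features):
--     """Index every name's ';'-split prefixes in dicts keyed by (tsd, strand, prefix);
--     rule 3 then becomes dictionary lookups instead of a +/-100 neighbour scan."""
--     full_idx = {}   # (tsd, strand, whole split tuple) -> positions having exactly that name/tsd/strand
--     for j, feat in enumerate(features):
--         parts = feat['name'].split(';')
--         if len(parts) > 1:
--             key = (feat.get('tsd'), feat.get('strand'), tuple(parts))
--             full_idx.setdefault(key, []).append(j)
--     pref_idx = {}   # (tsd, strand, split prefix of length >= 2) -> positions whose split extends it
--     for j, feat in enumerate(features):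
--         parts = feat['name'].split(';')
--         if len(parts) > 1:
--             for L in range(2, len(parts) + 1):
--                 key = (feat.get('tsd'), feat.get('strand'), tuple(parts[:L]))
--                 pref_idx.setdefault(key, []).append(j)
--     count = 0
--     for i, feat in enumerate(features):
--         parts = feat['name'].split(';')
--         fid = parts[0]
--         if 'gene' in fid.lower() or '_SOLO' in fid:
--             continue
--         if len(parts) > 1:
--             if 'CUT_BY' in parts[1]:
--                 continue
--             base = (feat.get('tsd'), feat.get('strand'))
--             # positions whose split extends (or equals) this feature's split:
--             cands = list(pref_idx.get(base + (tuple(parts),), []))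
--             # positions whose whole split is a proper prefix of this feature's split:
--             for L in range(2, len(parts)):
--                 cands += full_idx.get(base + (tuple(parts[:L]),), [])
--             if any(j != i and i - 100 <= j <= i + 100 for j in cands):
--                 continue
--         count += 1
--     return count
-- ===== Notes on version B (the rewrite author's own statement) =====
-- stated objective: alternative
-- what changed: A's rule-3 scan of the 201-line window around each feature is replaced by two dictionaries built once over all features, indexing every name's ';'-split prefixes by (tsd, strand, prefix), so each feature decides rule 3 by a handful of dictionary lookups filtered to the window; the four flag-array passes collapse into one counting loop over these indices.
import Mathlib
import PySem

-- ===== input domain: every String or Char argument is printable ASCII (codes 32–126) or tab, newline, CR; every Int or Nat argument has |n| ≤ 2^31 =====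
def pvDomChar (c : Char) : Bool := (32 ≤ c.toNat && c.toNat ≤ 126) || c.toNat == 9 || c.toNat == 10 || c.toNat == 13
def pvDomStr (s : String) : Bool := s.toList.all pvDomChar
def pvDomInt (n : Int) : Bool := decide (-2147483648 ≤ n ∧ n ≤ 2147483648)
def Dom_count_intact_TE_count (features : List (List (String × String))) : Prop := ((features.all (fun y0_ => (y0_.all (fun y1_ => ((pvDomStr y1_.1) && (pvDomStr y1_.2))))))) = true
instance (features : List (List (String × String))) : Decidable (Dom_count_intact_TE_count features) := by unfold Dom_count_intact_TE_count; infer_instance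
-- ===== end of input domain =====

-- B replaces A's ±100-line neighbour scan by dictionaries indexing every name's ';'-split
-- prefixes keyed by (tsd, strand, prefix): rule 3 becomes a few dictionary lookups
-- (objective: alternative data structure; equality of the RETURN value is proved).

-- shared field accessors: feat['name'] / feat['tsd'] / feat['strand'] (Python dict lookup;
-- Pre_ guarantees the keys are present where they are read, so the "" default never shows)
def nameOf (feat : List (String × String)) : String := (PySem.Dict.ofList feat).getD "name" ""
def tsdOf (feat : List (String × String)) : String := (PySem.Dict.ofList feat).getD "tsd" ""
def strandOf (feat : List (String × String)) : String := (PySem.Dict.ofList feat).getD "strand" ""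

-- ===== PORT A =====
-- s.split(';'): the separator ';' is non-empty, so PySem.Str.split? is always `some`
def splitSemi (s : String) : List String := (PySem.Str.split? s ";").getD []

-- partial_name_match of Source A
def pnmA (name1 name2 : String) : Bool :=
  if !(PySem.Str.isIn ";" name1) || !(PySem.Str.isIn ";" name2) then false
  else
    let parts1 := splitSemi name1
    let parts2 := splitSemi name2
    if parts1.length ≤ parts2.length && parts1 == PySem.List.slice parts2 none (some (parts1.length : Int)) then true
    else if parts2.length < parts1.length && parts2 == PySem.List.slice parts1 none (some (parts2.length : Int)) then true
    else false

-- A's rule-3 inner 'for j in range(...)' loop with its break: returns True iff a matching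
-- neighbour is found (features[j] is in range for every j produced, so the [] default is never used)
def rule3Loop (features : List (List (String × String))) (feat : List (String × String)) (i : Int) : List Int → Bool
  | [] => false
  | j :: rest =>
    if j == i then rule3Loop features feat i rest
    else
      let other := PySem.List.pyGetD features j []
      if tsdOf feat == tsdOf other && strandOf feat == strandOf other && pnmA (nameOf feat) (nameOf other) then true
      else rule3Loop features feat i rest

def count_intact_TE_count (features : List (List (String × String))) : Int :=
  let n := features.length
  let flags0 : List Bool := List.replicate n true
  -- Rule 1
  let flags1 := (PySem.List.enumerate features).foldl (fun fl p =>
    if PySem.Str.isIn "gene" (PySem.Str.lower (PySem.List.pyGetD (splitSemi (nameOf p.2)) 0 "")) then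
      PySem.List.pySetD fl p.1 false
    else fl) flags0
  -- Rule 4
  let flags2 := (PySem.List.enumerate features).foldl (fun fl p =>
    if PySem.Str.isIn "_SOLO" (PySem.List.pyGetD (splitSemi (nameOf p.2)) 0 "") then
      PySem.List.pySetD fl p.1 false
    else fl) flags1
  -- Rule 2
  let flags3 := (PySem.List.enumerate features).foldl (fun fl p =>
    if PySem.List.pyGetD fl p.1 true then
      let parts := splitSemi (nameOf p.2)
      if 1 < parts.length then
        if PySem.Str.isIn "CUT_BY" (PySem.List.pyGetD parts 1 "") then PySem.List.pySetD fl p.1 false else fl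
      else fl
    else fl) flags2
  -- Rule 3
  let flags4 := (PySem.List.enumerate features).foldl (fun fl p =>
    if !(PySem.List.pyGetD fl p.1 true) then fl
    else
      let parts := splitSemi (nameOf p.2)
      if parts.length ≤ 1 then fl
      else
        let ws := max 0 (p.1 - 100)
        let we := min (n : Int) (p.1 + 101)
        if rule3Loop features p.2 p.1 (PySem.List.pyRange ws we 1) then PySem.List.pySetD fl p.1 false else fl) flags3
  flags4.foldl (fun acc flag => if flag then acc + 1 else acc) 0

-- ===== PORT B =====
-- the dictionary key (feat.get('tsd'), feat.get('strand'), <a ';'-split prefix tuple>)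
def bkey (feat : List (String × String)) (pref : List String) : Option String × Option String × List String :=
  ((PySem.Dict.ofList feat).get? "tsd", (PySem.Dict.ofList feat).get? "strand", pref)

-- full_idx of Source B: whole split tuples -> positions
def buildFull (features : List (List (String × String))) : PySem.Dict (Option String × Option String × List String) (List Int) :=
  (PySem.List.enumerate features).foldl (fun d p =>
    let parts := splitSemi (nameOf p.2)
    if 1 < parts.length then d.modify (bkey p.2 parts) [] (· ++ [p.1]) else d) PySem.Dict.empty

-- pref_idx of Source B: every split prefix of length >= 2 -> positions
def buildPref (features : List (List (String × String))) : PySem.Dict (Option String × Option String × List String) (List Int) :=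
  (PySem.List.enumerate features).foldl (fun d p =>
    let parts := splitSemi (nameOf p.2)
    if 1 < parts.length then
      (PySem.List.pyRange 2 (PySem.List.len parts + 1) 1).foldl
        (fun d2 L => d2.modify (bkey p.2 (PySem.List.slice parts none (some L))) [] (· ++ [p.1])) d
    else d) PySem.Dict.empty

def count_intact_TE_count_alt (features : List (List (String × String))) : Int :=
  let full_idx := buildFull features
  let pref_idx := buildPref features
  (PySem.List.enumerate features).foldl (fun count p =>
    let parts := splitSemi (nameOf p.2)
    let fid := PySem.List.pyGetD parts 0 ""
    if PySem.Str.isIn "gene" (PySem.Str.lower fid) || PySem.Str.isIn "_SOLO" fid then count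
    else if 1 < parts.length then
      if PySem.Str.isIn "CUT_BY" (PySem.List.pyGetD parts 1 "") then count
      else
        let cands := (pref_idx.getD (bkey p.2 parts) []) ++
          (PySem.List.pyRange 2 (PySem.List.len parts) 1).foldl
            (fun acc L => acc ++ full_idx.getD (bkey p.2 (PySem.List.slice parts none (some L))) []) []
        if cands.any (fun j => (j != p.1) && decide (p.1 - 100 ≤ j) && decide (j ≤ p.1 + 100)) then count
        else count + 1
    else count + 1) 0

-- ===== PRECONDITION & SPEC =====
def hasKey (feat : List (String × String)) (k : String) : Bool := feat.any (fun kv => kv.1 == k)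

-- a feature's name passes rules 1, 4 and 2 and has supplemental fields, so rule 3 scans its window
def reaches3 (feat : List (String × String)) : Bool :=
  decide (1 < (splitSemi (nameOf feat)).length) &&
  !(PySem.Str.isIn "gene" (PySem.Str.lower (PySem.List.pyGetD (splitSemi (nameOf feat)) 0 ""))) &&
  !(PySem.Str.isIn "_SOLO" (PySem.List.pyGetD (splitSemi (nameOf feat)) 0 "")) &&
  !(PySem.Str.isIn "CUT_BY" (PySem.List.pyGetD (splitSemi (nameOf feat)) 1 ""))

-- Pre_ excludes the inputs on which the dict accesses feat['name'] / feat['tsd'] / feat['strand']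
-- can raise KeyError: every feature must carry 'name', and 'tsd'/'strand' are required on the whole
-- ±100 window of every feature whose name passes rules 1/4/2. This is slightly conservative: A's
-- window scan stops at the first match and skips the feature itself, so on some excluded inputs A
-- still returns — the exact KeyError set is not a simple shape condition on the input.
def Pre_count_intact_TE_count (features : List (List (String × String))) : Prop :=
  (features.all (fun feat => hasKey feat "name")
    && (List.range features.length).all (fun i =>
         !(reaches3 (features.getD i []))
         || (List.range features.length).all (fun j =>
              if (i : Int) - 100 ≤ (j : Int) ∧ (j : Int) ≤ (i : Int) + 100 then
                hasKey (features.getD j []) "tsd" && hasKey (features.getD j []) "strand"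
              else true))) = true
instance (features : List (List (String × String))) : Decidable (Pre_count_intact_TE_count features) := by unfold Pre_count_intact_TE_count; infer_instance

def pvWitness_count_intact_TE_count : (List (List (String × String))) :=
  [[("name", "A;B"), ("tsd", "t"), ("strand", "+")], [("name", "gene1;x"), ("tsd", "t"), ("strand", "+")]]

def Spec_count_intact_TE_count (features : List (List (String × String))) (out : Int) : Prop := out = count_intact_TE_count_alt features
instance (features : List (List (String × String))) (out : Int) : Decidable (Spec_count_intact_TE_count features out) := by unfold Spec_count_intact_TE_count; infer_instance

-- ===== CLAIM (what is proved, stated in full; the proofs are below) =====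
def Claim_equal_count_intact_TE_count : Prop := ∀ (features : List (List (String × String))), Dom_count_intact_TE_count features → Pre_count_intact_TE_count features → Spec_count_intact_TE_count features (count_intact_TE_count features)

-- ===== LEMMAS AND PROOFS =====

-- partial_name_match as a single comparison up to the shorter split length (proof-side form)
def pnm2 (name1 name2 : String) : Bool :=
  if !(PySem.Str.isIn ";" name1) || !(PySem.Str.isIn ";" name2) then false
  else
    let p1 := splitSemi name1
    let p2 := splitSemi name2
    let m := min p1.length p2.length
    p1.take m == p2.take m

-- the per-feature window-scan predicate A computes in rule 3
def nbAny (features : List (List (String × String))) (feat : List (String × String)) (i : Int) : Bool :=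
  (PySem.List.pyRange (max 0 (i - 100)) (min (features.length : Int) (i + 101)) 1).any (fun j =>
    (j != i) && (tsdOf feat == tsdOf (PySem.List.pyGetD features j [])) &&
    (strandOf feat == strandOf (PySem.List.pyGetD features j [])) &&
    pnm2 (nameOf feat) (nameOf (PySem.List.pyGetD features j [])))

-- the candidate-lookup predicate B computes in rule 3
def candAny (features : List (List (String × String))) (feat : List (String × String)) (i : Int) : Bool :=
  ((buildPref features).getD (bkey feat (splitSemi (nameOf feat))) [] ++
   (PySem.List.pyRange 2 (PySem.List.len (splitSemi (nameOf feat))) 1).foldl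
     (fun acc L => acc ++ (buildFull features).getD (bkey feat (PySem.List.slice (splitSemi (nameOf feat)) none (some L))) []) []).any
    (fun j => (j != i) && decide (i - 100 ≤ j) && decide (j ≤ i + 100))

def keepP (features : List (List (String × String))) (k : Nat) : Bool :=
  let feat := features.getD k []
  let parts := splitSemi (nameOf feat)
  let fid := PySem.List.pyGetD parts 0 ""
  !(PySem.Str.isIn "gene" (PySem.Str.lower fid)) &&
  !(PySem.Str.isIn "_SOLO" fid) &&
  !(decide (1 < parts.length) && PySem.Str.isIn "CUT_BY" (PySem.List.pyGetD parts 1 "")) &&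
  !(decide (1 < parts.length) && nbAny features feat (k : Int))

def keepB (features : List (List (String × String))) (k : Nat) : Bool :=
  let feat := features.getD k []
  let parts := splitSemi (nameOf feat)
  let fid := PySem.List.pyGetD parts 0 ""
  !(PySem.Str.isIn "gene" (PySem.Str.lower fid)) &&
  !(PySem.Str.isIn "_SOLO" fid) &&
  !(decide (1 < parts.length) && PySem.Str.isIn "CUT_BY" (PySem.List.pyGetD parts 1 "")) &&
  !(decide (1 < parts.length) && candAny features feat (k : Int))

-- ---- the ';' / split-length bridge ----
theorem go_len (c : Char) : ∀ (fuel : Nat) (l cur : List Char) (acc : List (List Char)),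
    l.length < fuel →
    (PySem.Chars.splitOn.go [c] fuel l cur acc).length = acc.length + 1 + l.count c := by
  intro fuel
  induction fuel with
  | zero => intro l cur acc h; omega
  | succ f ih =>
    intro l cur acc h
    cases l with
    | nil => simp [PySem.Chars.splitOn.go]
    | cons x rest =>
      rw [PySem.Chars.splitOn.go]
      simp only [List.length_cons] at h
      by_cases hx : x = c
      · have hp : [c].isPrefixOf (x :: rest) = true := by simp [List.isPrefixOf, hx]
        rw [if_pos hp]
        have hd : List.drop [c].length (x :: rest) = rest := by simp
        rw [hd, ih _ _ _ (by omega)]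
        simp [hx]
        omega
      · have hp : ¬ ([c].isPrefixOf (x :: rest) = true) := by
          simp [List.isPrefixOf]
          exact fun hc => absurd hc.symm hx
        rw [if_neg hp, ih _ _ _ (by omega)]
        simp [hx]

theorem semi_len (s : String) : (splitSemi s).length = s.toList.count ';' + 1 := by
  have h1 : PySem.Str.split? s ";" = some ((PySem.Chars.splitOn s.toList [';']).map String.ofList) := by
    simp [PySem.Str.split?, PySem.Chars.split?]
  rw [splitSemi, h1]
  have h2 : s.toList.length < s.length + 1 := by rw [String.length_toList]; omega
  simp [PySem.Chars.splitOn, go_len ';' (s.length + 1) s.toList [] [] h2]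
  omega

theorem semi_isIn (s : String) :
    PySem.Str.isIn ";" s = decide (1 < (splitSemi s).length) := by
  rw [Bool.eq_iff_iff, PySem.Str.isIn_iff_infix, decide_eq_true_iff, semi_len]
  have hts : (";".toList : List Char) = [';'] := by decide
  rw [hts, List.singleton_infix_iff]
  constructor
  · intro h; have := List.count_pos_iff.mpr h; omega
  · intro h; exact List.count_pos_iff.mp (by omega)

-- ---- bucket characterisations ----
def fullEnt (p : Int × List (String × String)) : List ((Option String × Option String × List String) × Int) :=
  if 1 < (splitSemi (nameOf p.2)).length then [(bkey p.2 (splitSemi (nameOf p.2)), p.1)] else []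

theorem buildFull_flat (features : List (List (String × String))) :
    buildFull features = ((PySem.List.enumerate features).flatMap fullEnt).foldl
      (fun d e => d.modify e.1 [] (· ++ [e.2])) PySem.Dict.empty := by
  rw [List.foldl_flatMap, buildFull]
  congr 1
  funext d p
  simp only [fullEnt]
  split <;> simp


theorem mem_buildFull (features : List (List (String × String)))
    (c : Option String × Option String × List String) (j : Int) :
    j ∈ (buildFull features).getD c [] ↔
      ∃ k : Nat, k < features.length ∧ j = (k : Int) ∧
        1 < (splitSemi (nameOf (features.getD k []))).length ∧
        c = bkey (features.getD k []) (splitSemi (nameOf (features.getD k []))) := by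
  rw [buildFull_flat, PySem.Dict.getD_foldl_modify_append]
  simp only [PySem.Dict.getD_empty, List.nil_append, List.mem_map, List.mem_filter,
    List.mem_flatMap, PySem.List.mem_enumerate_iff, beq_iff_eq]
  constructor
  · rintro ⟨⟨ck, jj⟩, ⟨⟨⟨p, ⟨k, hk, hp⟩, hmem⟩, hfil⟩, rfl⟩⟩
    subst hp
    simp only [fullEnt] at hmem
    by_cases hlen : 1 < (splitSemi (nameOf features[k])).length
    · rw [if_pos hlen] at hmem
      simp only [List.mem_singleton, Prod.mk.injEq] at hmem
      obtain ⟨h1, h2⟩ := hmem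
      simp only at hfil
      refine ⟨k, hk, ?_, ?_, ?_⟩
      · simp [h2]
      · rw [List.getD_eq_getElem _ _ hk]; exact hlen
      · rw [List.getD_eq_getElem _ _ hk, ← hfil, h1]
    · rw [if_neg hlen] at hmem; simp at hmem
  · rintro ⟨k, hk, rfl, hlen, hc⟩
    refine ⟨(c, (k : Int)), ⟨⟨((0 : Int) + (k : Int), features[k]'hk), ⟨k, hk, rfl⟩, ?_⟩, rfl⟩, rfl⟩
    simp only [fullEnt]
    rw [List.getD_eq_getElem _ _ hk] at hlen hc
    rw [if_pos hlen, hc]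
    simp

def prefEnt (p : Int × List (String × String)) : List ((Option String × Option String × List String) × Int) :=
  if 1 < (splitSemi (nameOf p.2)).length then
    (PySem.List.pyRange 2 (PySem.List.len (splitSemi (nameOf p.2)) + 1) 1).map
      (fun L => (bkey p.2 (PySem.List.slice (splitSemi (nameOf p.2)) none (some L)), p.1))
  else []

theorem buildPref_flat (features : List (List (String × String))) :
    buildPref features = ((PySem.List.enumerate features).flatMap prefEnt).foldl
      (fun d e => d.modify e.1 [] (· ++ [e.2])) PySem.Dict.empty := by
  rw [List.foldl_flatMap, buildPref]
  congr 1
  funext d p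
  simp only [prefEnt]
  split
  · rw [List.foldl_map]
  · simp

theorem mem_buildPref (features : List (List (String × String)))
    (c : Option String × Option String × List String) (j : Int) :
    j ∈ (buildPref features).getD c [] ↔
      ∃ k : Nat, k < features.length ∧ j = (k : Int) ∧
        1 < (splitSemi (nameOf (features.getD k []))).length ∧
        ∃ L : Nat, 2 ≤ L ∧ L ≤ (splitSemi (nameOf (features.getD k []))).length ∧
          c = bkey (features.getD k []) ((splitSemi (nameOf (features.getD k []))).take L) := by
  rw [buildPref_flat, PySem.Dict.getD_foldl_modify_append]
  simp only [PySem.Dict.getD_empty, List.nil_append, List.mem_map, List.mem_filter,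
    List.mem_flatMap, PySem.List.mem_enumerate_iff, beq_iff_eq]
  constructor
  · rintro ⟨⟨ck, jj⟩, ⟨⟨⟨p, ⟨k, hk, hp⟩, hmem⟩, hfil⟩, rfl⟩⟩
    subst hp
    simp only [prefEnt] at hmem
    by_cases hlen : 1 < (splitSemi (nameOf features[k])).length
    · rw [if_pos hlen] at hmem
      simp only [List.mem_map, Prod.mk.injEq] at hmem
      obtain ⟨L, hL, h1, h2⟩ := hmem
      rw [PySem.List.mem_pyRange_one] at hL
      simp only [PySem.List.len_eq] at hL
      simp only at hfil
      have hgd : features.getD k [] = features[k] := List.getD_eq_getElem _ _ hk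
      refine ⟨k, hk, by omega, by rw [hgd]; exact hlen,
        L.toNat, by omega, by rw [hgd]; omega, ?_⟩
      rw [hgd, ← hfil, ← h1]
      congr 1
      rw [PySem.List.slice_to _ (by omega)]
    · rw [if_neg hlen] at hmem; simp at hmem
  · rintro ⟨k, hk, rfl, hlen, L, hL2, hLle, hc⟩
    refine ⟨(c, (k : Int)), ⟨⟨((0 : Int) + (k : Int), features[k]'hk), ⟨k, hk, rfl⟩, ?_⟩, rfl⟩, rfl⟩
    simp only [prefEnt]
    rw [List.getD_eq_getElem _ _ hk] at hlen hc hLle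
    rw [if_pos hlen]
    simp only [List.mem_map, Prod.mk.injEq]
    refine ⟨(L : Int), ?_, ?_, by omega⟩
    · rw [PySem.List.mem_pyRange_one]
      simp only [PySem.List.len_eq]
      omega
    · rw [hc]
      congr 1
      rw [PySem.List.slice_to _ (by omega)]
      simp

-- hasKey matches Dict.contains
theorem contains_update (pairs : List (String × String)) :
    ∀ (d : PySem.Dict String String) (k : String),
    (d.update pairs).contains k = (d.contains k || pairs.any (fun kv => kv.1 == k)) := by
  induction pairs with
  | nil => intro d k; simp [PySem.Dict.update]
  | cons p rest ih =>
    intro d k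
    have h1 : (d.update (p :: rest)) = ((d.insert p.1 p.2).update rest) := by
      simp [PySem.Dict.update]
    rw [h1, ih, PySem.Dict.contains_insert, List.any_cons]
    rw [show (k == p.1) = (p.1 == k) from Bool.beq_comm ..]
    cases (p.1 == k) <;> cases d.contains k <;> simp

theorem hasKey_contains (feat : List (String × String)) (k : String) :
    (PySem.Dict.ofList feat).contains k = hasKey feat k := by
  rw [PySem.Dict.ofList, contains_update, PySem.Dict.contains_empty, Bool.false_or, hasKey]

theorem get?_of_hasKey (feat : List (String × String)) (k : String) (h : hasKey feat k = true) (d : String) :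
    (PySem.Dict.ofList feat).get? k = some ((PySem.Dict.ofList feat).getD k d) := by
  have hc : (PySem.Dict.ofList feat).contains k = true := by rw [hasKey_contains]; exact h
  rw [PySem.Dict.contains_eq_isSome_get?] at hc
  obtain ⟨v, hv⟩ := Option.isSome_iff_exists.mp hc
  rw [hv, PySem.Dict.getD_eq_get?_getD, hv]
  rfl

-- ---- the rule-3 equivalence: window scan = index lookups ----
theorem key_beq_iff (a b : List (String × String)) (k : String)
    (ha : hasKey a k = true) (hb : hasKey b k = true) :
    ((PySem.Dict.ofList a).get? k = (PySem.Dict.ofList b).get? k) ↔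
      (((PySem.Dict.ofList a).getD k "" : String) == (PySem.Dict.ofList b).getD k "") = true := by
  rw [get?_of_hasKey a k ha "", get?_of_hasKey b k hb "", beq_iff_eq, Option.some_inj]

theorem cand_eq_nb (features : List (List (String × String))) (i : Nat)
    (hi : i < features.length)
    (hpre : Pre_count_intact_TE_count features)
    (hr : reaches3 (features.getD i []) = true) :
    candAny features (features.getD i []) (i : Int) = nbAny features (features.getD i []) (i : Int) := by
  have hQ : 1 < (splitSemi (nameOf (features.getD i []))).length := by
    unfold reaches3 at hr
    rw [Bool.and_eq_true, Bool.and_eq_true, Bool.and_eq_true] at hr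
    exact of_decide_eq_true hr.1.1.1
  have hwin : ∀ j : Nat, j < features.length → (i : Int) - 100 ≤ (j : Int) → (j : Int) ≤ (i : Int) + 100 →
      hasKey (features.getD j []) "tsd" = true ∧ hasKey (features.getD j []) "strand" = true := by
    have hp2 := hpre
    unfold Pre_count_intact_TE_count at hp2
    rw [Bool.and_eq_true] at hp2
    have h2 := hp2.2
    rw [List.all_eq_true] at h2
    intro j hj hlo hhi2
    have hhi := h2 i (List.mem_range.mpr hi)
    rw [hr] at hhi
    simp only [Bool.not_true, Bool.false_or, List.all_eq_true] at hhi
    have hj' := hhi j (List.mem_range.mpr hj)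
    rw [if_pos ⟨hlo, hhi2⟩] at hj'
    rw [Bool.and_eq_true] at hj'
    exact hj'
  have hki := hwin i hi (by omega) (by omega)
  rw [Bool.eq_iff_iff]
  unfold candAny nbAny
  rw [PySem.List.foldl_append_eq_flatMap]
  simp only [List.nil_append, List.any_append, Bool.or_eq_true, List.any_eq_true,
    List.mem_flatMap, Bool.and_eq_true, bne_iff_ne, ne_eq, decide_eq_true_eq,
    PySem.List.mem_pyRange_one, PySem.List.len_eq]
  constructor
  · rintro (⟨j, hjmem, ⟨hne, hlo⟩, hhi2⟩ | ⟨j, ⟨L, ⟨hL2, hLlt⟩, hjmem⟩, ⟨hne, hlo⟩, hhi2⟩)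
    · -- prefix-index hit: i's whole split is a prefix of k's split
      rw [mem_buildPref] at hjmem
      obtain ⟨k, hk, rfl, hlenk, L, hL2, hLle, hkeyeq⟩ := hjmem
      have hkk := hwin k hk hlo hhi2
      rw [bkey, bkey, Prod.mk.injEq, Prod.mk.injEq] at hkeyeq
      obtain ⟨htsd, hstr, hpartseq⟩ := hkeyeq
      have hLi : (splitSemi (nameOf (features.getD i []))).length = L := by
        rw [hpartseq, List.length_take]; omega
      refine ⟨(k : Int), ⟨by omega, by omega⟩, ⟨⟨⟨hne, ?_⟩, ?_⟩, ?_⟩⟩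
      · simp only [PySem.List.pyGetD_natCast]
        exact (key_beq_iff _ _ _ hki.1 hkk.1).mp htsd
      · simp only [PySem.List.pyGetD_natCast]
        exact (key_beq_iff _ _ _ hki.2 hkk.2).mp hstr
      · simp only [PySem.List.pyGetD_natCast]
        unfold pnm2
        rw [semi_isIn, semi_isIn]
        rw [if_neg (by simp only [Bool.or_eq_true, Bool.not_eq_true', decide_eq_false_iff_not]; push_neg; exact ⟨hQ, hlenk⟩)]
        simp only [beq_iff_eq]
        have hmin : min (splitSemi (nameOf (features.getD i []))).length (splitSemi (nameOf (features.getD k []))).length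
            = (splitSemi (nameOf (features.getD i []))).length := by omega
        rw [hmin, List.take_of_length_le (le_refl _), hLi]
        exact hpartseq
    · -- full-index hit: k's whole split is a proper prefix of i's split
      rw [mem_buildFull] at hjmem
      obtain ⟨k, hk, rfl, hlenk, hkeyeq⟩ := hjmem
      have hkk := hwin k hk hlo hhi2
      rw [bkey, bkey, Prod.mk.injEq, Prod.mk.injEq] at hkeyeq
      obtain ⟨htsd, hstr, hpartseq⟩ := hkeyeq
      rw [PySem.List.slice_to _ (by omega)] at hpartseq
      have hLk : (splitSemi (nameOf (features.getD k []))).length = L.toNat := by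
        rw [← hpartseq, List.length_take]; omega
      refine ⟨(k : Int), ⟨by omega, by omega⟩, ⟨⟨⟨hne, ?_⟩, ?_⟩, ?_⟩⟩
      · simp only [PySem.List.pyGetD_natCast]
        exact (key_beq_iff _ _ _ hki.1 hkk.1).mp htsd
      · simp only [PySem.List.pyGetD_natCast]
        exact (key_beq_iff _ _ _ hki.2 hkk.2).mp hstr
      · simp only [PySem.List.pyGetD_natCast]
        unfold pnm2
        rw [semi_isIn, semi_isIn]
        rw [if_neg (by simp only [Bool.or_eq_true, Bool.not_eq_true', decide_eq_false_iff_not]; push_neg; exact ⟨hQ, hlenk⟩)]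
        simp only [beq_iff_eq]
        have hmin : min (splitSemi (nameOf (features.getD i []))).length (splitSemi (nameOf (features.getD k []))).length
            = (splitSemi (nameOf (features.getD k []))).length := by omega
        rw [hmin, List.take_of_length_le (le_refl _), hLk]
        exact hpartseq
  · rintro ⟨j, ⟨hlo', hhi'⟩, ⟨⟨⟨hne, htsd⟩, hstr⟩, hpnm⟩⟩
    have hj0 : 0 ≤ j := le_trans (le_max_left _ _) hlo'
    have hjn : j < (features.length : Int) := lt_of_lt_of_le hhi' (min_le_left _ _)
    obtain ⟨k, rfl⟩ : ∃ k : Nat, j = (k : Int) := ⟨j.toNat, (Int.toNat_of_nonneg hj0).symm⟩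
    have hk : k < features.length := by omega
    have hlo : (i : Int) - 100 ≤ (k : Int) := by omega
    have hhi2 : (k : Int) ≤ (i : Int) + 100 := by omega
    have hkk := hwin k hk hlo hhi2
    simp only [PySem.List.pyGetD_natCast] at htsd hstr hpnm
    unfold pnm2 at hpnm
    rw [semi_isIn, semi_isIn] at hpnm
    by_cases hlenk : 1 < (splitSemi (nameOf (features.getD k []))).length
    swap
    · rw [if_pos (by simp only [Bool.or_eq_true, Bool.not_eq_true', decide_eq_false_iff_not]; exact Or.inr hlenk)] at hpnm
      exact absurd hpnm (by simp)
    rw [if_neg (by simp only [Bool.or_eq_true, Bool.not_eq_true', decide_eq_false_iff_not]; push_neg; exact ⟨hQ, hlenk⟩)] at hpnm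
    simp only [beq_iff_eq] at hpnm
    have htsd' := (key_beq_iff _ _ "tsd" hki.1 hkk.1).mpr htsd
    have hstr' := (key_beq_iff _ _ "strand" hki.2 hkk.2).mpr hstr
    by_cases hle : (splitSemi (nameOf (features.getD i []))).length ≤ (splitSemi (nameOf (features.getD k []))).length
    · -- i's split is a prefix of k's: k sits in the prefix index under i's full key
      left
      refine ⟨(k : Int), ?_, ⟨⟨hne, hlo⟩, hhi2⟩⟩
      rw [mem_buildPref]
      refine ⟨k, hk, rfl, hlenk, (splitSemi (nameOf (features.getD i []))).length, by omega, hle, ?_⟩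
      rw [bkey, bkey, Prod.mk.injEq, Prod.mk.injEq]
      refine ⟨htsd', hstr', ?_⟩
      have hmin : min (splitSemi (nameOf (features.getD i []))).length (splitSemi (nameOf (features.getD k []))).length
          = (splitSemi (nameOf (features.getD i []))).length := by omega
      rw [hmin, List.take_of_length_le (le_refl _)] at hpnm
      exact hpnm
    · -- k's whole split is a proper prefix of i's: k sits in the full index under that prefix
      right
      push_neg at hle
      refine ⟨(k : Int), ⟨((splitSemi (nameOf (features.getD k []))).length : Int), ⟨by omega, by omega⟩, ?_⟩, ⟨⟨hne, hlo⟩, hhi2⟩⟩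
      rw [mem_buildFull]
      refine ⟨k, hk, rfl, hlenk, ?_⟩
      rw [bkey, bkey, Prod.mk.injEq, Prod.mk.injEq]
      refine ⟨htsd', hstr', ?_⟩
      rw [PySem.List.slice_to _ (by omega)]
      have hmin : min (splitSemi (nameOf (features.getD i []))).length (splitSemi (nameOf (features.getD k []))).length
          = (splitSemi (nameOf (features.getD k []))).length := by omega
      rw [hmin, List.take_of_length_le (le_refl _)] at hpnm
      rw [Int.toNat_natCast]
      exact hpnm

-- ===== A = foldl keepP (unchanged from the flag-array analysis) =====
theorem pnm_eq (n1 n2 : String) : pnmA n1 n2 = pnm2 n1 n2 := by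
  unfold pnmA pnm2
  split
  · rfl
  · simp only [PySem.List.slice_to_natCast]
    set p1 := splitSemi n1
    set p2 := splitSemi n2
    by_cases h : p1.length ≤ p2.length
    · simp [h, List.take_length]
      rw [Bool.eq_iff_iff]
      simp [Nat.not_lt.mpr h]
    · rw [Nat.not_le] at h
      have h2 : ¬ p1.length ≤ p2.length := Nat.not_le.mpr h
      have h3 : min p1.length p2.length = p2.length := min_eq_right (le_of_lt h)
      simp only [h2, h3, List.take_length]
      simp only [decide_false, Bool.false_and, Bool.false_eq_true, if_false, h, decide_true, Bool.true_and]
      rw [show (List.take p2.length p1 == p2) = (p2 == List.take p2.length p1) from Bool.beq_comm]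
      cases hb : (p2 == List.take p2.length p1) <;> simp

theorem rule3Loop_eq_any (features : List (List (String × String))) (feat : List (String × String)) (i : Int) (js : List Int) :
    rule3Loop features feat i js = js.any (fun j =>
      (j != i) && (tsdOf feat == tsdOf (PySem.List.pyGetD features j [])) &&
      (strandOf feat == strandOf (PySem.List.pyGetD features j [])) &&
      pnm2 (nameOf feat) (nameOf (PySem.List.pyGetD features j []))) := by
  induction js with
  | nil => rfl
  | cons j rest ih =>
    rw [rule3Loop, List.any_cons, ih]
    by_cases hj : j = i
    · simp [hj]
    · simp only [if_neg (by simpa using hj)]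
      rw [pnm_eq]
      cases hcond : ((tsdOf feat == tsdOf (PySem.List.pyGetD features j [])) &&
          (strandOf feat == strandOf (PySem.List.pyGetD features j [])) &&
          pnm2 (nameOf feat) (nameOf (PySem.List.pyGetD features j []))) <;>
        simp_all [Bool.and_assoc]

-- one pass of A's shape: the resulting flag list, read at index k
def passStep {α : Type} (cond : Int → α → Bool → Bool) (fl : List Bool) (p : Int × α) : List Bool :=
  if cond p.1 p.2 (PySem.List.pyGetD fl p.1 true) then PySem.List.pySetD fl p.1 false else fl

theorem passFold_length {α : Type} (cond : Int → α → Bool → Bool) (xs : List α) (s : Int) (fl : List Bool) :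
    ((PySem.List.enumerate xs s).foldl (passStep cond) fl).length = fl.length := by
  induction xs generalizing s fl with
  | nil => rfl
  | cons x xs ih =>
    rw [PySem.List.enumerate_cons, List.foldl_cons, ih]
    unfold passStep
    split <;> simp

theorem passFold_pyGetD {α : Type} (cond : Int → α → Bool → Bool) (d : α) (xs : List α) :
    ∀ (s : Nat) (fl : List Bool), fl.length = s + xs.length →
    ∀ (k : Nat), k < fl.length →
    PySem.List.pyGetD ((PySem.List.enumerate xs (s : Int)).foldl (passStep cond) fl) (k : Int) true
      = if s ≤ k then
          (if cond (k : Int) (xs.getD (k - s) d) (PySem.List.pyGetD fl (k : Int) true) then false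
           else PySem.List.pyGetD fl (k : Int) true)
        else PySem.List.pyGetD fl (k : Int) true := by
  induction xs with
  | nil =>
    intro s fl hlen k hk
    rw [PySem.List.enumerate_nil, List.foldl_nil, if_neg (by simp at hlen; omega)]
  | cons x xs ih =>
    intro s fl hlen k hk
    rw [PySem.List.enumerate_cons, List.foldl_cons]
    have hs : s < fl.length := by simp at hlen; omega
    have hstep : (passStep cond fl ((s : Int), x)).length = fl.length := by
      unfold passStep; split <;> simp
    have hlen' : (passStep cond fl ((s : Int), x)).length = (s + 1) + xs.length := by
      rw [hstep]; simp at hlen ⊢; omega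
    have hk' : k < (passStep cond fl ((s : Int), x)).length := by rw [hstep]; exact hk
    have hcast : ((s : Int) + 1) = ((s + 1 : Nat) : Int) := by push_cast; ring
    rw [hcast, ih (s + 1) _ hlen' k hk']
    have hget : ∀ m : Nat, PySem.List.pyGetD (passStep cond fl ((s : Int), x)) (m : Int) true
        = if m = s then (if cond (s : Int) x (PySem.List.pyGetD fl (s : Int) true) then false
                         else PySem.List.pyGetD fl (s : Int) true)
          else PySem.List.pyGetD fl (m : Int) true := by
      intro m
      by_cases hc : cond (s : Int) x (PySem.List.pyGetD fl (s : Int) true) = true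
      · have hps : passStep cond fl ((s : Int), x) = PySem.List.pySetD fl (s : Int) false := by
          unfold passStep; rw [if_pos hc]
        rw [hps, PySem.List.pyGetD_pySetD_natCast fl s m false true hs]
        by_cases hms : m = s
        · rw [if_pos hms, if_pos hms, if_pos hc]
        · rw [if_neg hms, if_neg hms]
      · have hps : passStep cond fl ((s : Int), x) = fl := by
          unfold passStep; rw [if_neg hc]
        rw [hps]
        by_cases hms : m = s
        · rw [if_pos hms, if_neg hc, hms]
        · rw [if_neg hms]
    by_cases hks : k = s
    · subst hks
      rw [if_neg (by omega), hget k, if_pos rfl, if_pos (le_refl k)]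
      simp
    · rw [hget k, if_neg hks]
      by_cases hsk : s + 1 ≤ k
      · rw [if_pos hsk, if_pos (show s ≤ k from by omega)]
        have : k - s = (k - (s + 1)) + 1 := by omega
        rw [this, List.getD_cons_succ]
      · rw [if_neg hsk, if_neg (show ¬ s ≤ k from by omega)]

-- the four rules as conditions of A's uniform pass shape
def c1 : Int → List (String × String) → Bool → Bool := fun _ feat _ =>
  PySem.Str.isIn "gene" (PySem.Str.lower (PySem.List.pyGetD (splitSemi (nameOf feat)) 0 ""))
def c2 : Int → List (String × String) → Bool → Bool := fun _ feat _ =>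
  PySem.Str.isIn "_SOLO" (PySem.List.pyGetD (splitSemi (nameOf feat)) 0 "")
def c3 : Int → List (String × String) → Bool → Bool := fun _ feat old =>
  old && (decide (1 < (splitSemi (nameOf feat)).length) &&
    PySem.Str.isIn "CUT_BY" (PySem.List.pyGetD (splitSemi (nameOf feat)) 1 ""))
def c4 (features : List (List (String × String))) : Int → List (String × String) → Bool → Bool := fun i feat old =>
  old && (decide (1 < (splitSemi (nameOf feat)).length) &&
    rule3Loop features feat i (PySem.List.pyRange (max 0 (i - 100)) (min (features.length : Int) (i + 101)) 1))

-- the chain of A's four per-index updates, as one boolean formula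
theorem boolchain (G S Q C N : Bool) :
    (if ((if ((if S = true then false else if G = true then false else true) && (Q && C)) = true then false
          else if S = true then false else if G = true then false else true) && (Q && N)) = true then false
     else if ((if S = true then false else if G = true then false else true) && (Q && C)) = true then false
          else if S = true then false else if G = true then false else true)
    = (!G && !S && !(Q && C) && !(Q && N)) := by
  cases G <;> cases S <;> cases Q <;> cases C <;> cases N <;> rfl

theorem getD_replicate_true (n k : Nat) : (List.replicate n true).getD k true = true := by
  rcases Nat.lt_or_ge k n with h | h
  · rw [List.getD_eq_getElem _ _ (by simpa using h)]
    simp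
  · rw [List.getD_eq_default _ _ (by simpa using h)]

theorem if_not_flip (b : Bool) (x y : Int) : (if b = true then x else y) = (if (!b) = true then y else x) := by
  cases b <;> rfl

theorem A_eq (features : List (List (String × String))) :
    count_intact_TE_count features
      = (List.range features.length).foldl
          (fun acc k => if keepP features k then acc + 1 else acc) 0 := by
  simp only [count_intact_TE_count]
  have hL1 : (fun (fl : List Bool) (p : Int × List (String × String)) =>
      if PySem.Str.isIn "gene" (PySem.Str.lower (PySem.List.pyGetD (splitSemi (nameOf p.2)) 0 "")) then
        PySem.List.pySetD fl p.1 false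
      else fl) = passStep c1 := by
    funext fl p
    simp only [passStep, c1]
    rfl
  have hL2 : (fun (fl : List Bool) (p : Int × List (String × String)) =>
      if PySem.Str.isIn "_SOLO" (PySem.List.pyGetD (splitSemi (nameOf p.2)) 0 "") then
        PySem.List.pySetD fl p.1 false
      else fl) = passStep c2 := by
    funext fl p
    simp only [passStep, c2]
    rfl
  have hL3 : (fun (fl : List Bool) (p : Int × List (String × String)) =>
      if PySem.List.pyGetD fl p.1 true then
        let parts := splitSemi (nameOf p.2)
        if 1 < parts.length then
          if PySem.Str.isIn "CUT_BY" (PySem.List.pyGetD parts 1 "") then PySem.List.pySetD fl p.1 false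
          else fl
        else fl
      else fl) = passStep c3 := by
    funext fl p
    simp only [passStep, c3]
    by_cases h0 : PySem.List.pyGetD fl p.1 true = true <;>
    by_cases hq : 1 < (splitSemi (nameOf p.2)).length <;>
    by_cases hc : PySem.Str.isIn "CUT_BY" (PySem.List.pyGetD (splitSemi (nameOf p.2)) 1 "") = true <;>
    simp [h0, hq, hc]
  have hL4 : (fun (fl : List Bool) (p : Int × List (String × String)) =>
      if !(PySem.List.pyGetD fl p.1 true) then fl
      else
        let parts := splitSemi (nameOf p.2)
        if parts.length ≤ 1 then fl
        else
          let ws := max 0 (p.1 - 100)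
          let we := min ((features.length : Nat) : Int) (p.1 + 101)
          if rule3Loop features p.2 p.1 (PySem.List.pyRange ws we 1) then PySem.List.pySetD fl p.1 false
          else fl) = passStep (c4 features) := by
    funext fl p
    simp only [passStep, c4]
    by_cases h0 : PySem.List.pyGetD fl p.1 true = true <;>
    by_cases hq : 1 < (splitSemi (nameOf p.2)).length <;>
    by_cases hr : rule3Loop features p.2 p.1
      (PySem.List.pyRange (max 0 (p.1 - 100)) (min ((features.length : Nat) : Int) (p.1 + 101)) 1) = true <;>
    simp [h0, hq, hr, Nat.lt_iff_add_one_le]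
  rw [hL1, hL2, hL3, hL4]
  have l0 : (List.replicate features.length true).length = 0 + features.length := by simp
  have l1 : (List.foldl (passStep c1) (List.replicate features.length true)
      (PySem.List.enumerate features 0)).length = 0 + features.length := by
    rw [passFold_length]; exact l0
  have l2 : (List.foldl (passStep c2) (List.foldl (passStep c1) (List.replicate features.length true)
      (PySem.List.enumerate features 0)) (PySem.List.enumerate features 0)).length = 0 + features.length := by
    rw [passFold_length]; exact l1
  have l3 : (List.foldl (passStep c3) (List.foldl (passStep c2) (List.foldl (passStep c1)
      (List.replicate features.length true) (PySem.List.enumerate features 0))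
      (PySem.List.enumerate features 0)) (PySem.List.enumerate features 0)).length = 0 + features.length := by
    rw [passFold_length]; exact l2
  have l4 : (List.foldl (passStep (c4 features)) (List.foldl (passStep c3) (List.foldl (passStep c2)
      (List.foldl (passStep c1) (List.replicate features.length true) (PySem.List.enumerate features 0))
      (PySem.List.enumerate features 0)) (PySem.List.enumerate features 0))
      (PySem.List.enumerate features 0)).length = 0 + features.length := by
    rw [passFold_length]; exact l3
  have hzero : (PySem.List.enumerate features 0) = PySem.List.enumerate features (((0 : Nat) : Int)) := by
    norm_num
  have key : ∀ k : Nat, k < features.length →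
      PySem.List.pyGetD (List.foldl (passStep (c4 features)) (List.foldl (passStep c3)
        (List.foldl (passStep c2) (List.foldl (passStep c1) (List.replicate features.length true)
        (PySem.List.enumerate features 0)) (PySem.List.enumerate features 0))
        (PySem.List.enumerate features 0)) (PySem.List.enumerate features 0)) (k : Int) true
      = keepP features k := by
    intro k hk
    rw [hzero]
    rw [passFold_pyGetD (c4 features) [] features 0 _ (by rw [← hzero]; exact l3) k
      (by rw [← hzero, l3]; omega)]
    rw [passFold_pyGetD c3 [] features 0 _ (by rw [← hzero]; exact l2) k (by rw [← hzero, l2]; omega)]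
    rw [passFold_pyGetD c2 [] features 0 _ (by rw [← hzero]; exact l1) k (by rw [← hzero, l1]; omega)]
    rw [passFold_pyGetD c1 [] features 0 _ (by exact l0) k (by rw [l0]; omega)]
    simp only [Nat.sub_zero, Nat.zero_le, if_pos, PySem.List.pyGetD_natCast, getD_replicate_true]
    unfold c1 c2 c3 c4 keepP nbAny
    rw [rule3Loop_eq_any]
    exact boolchain _ _ _ _ _
  have hlist : (List.foldl (passStep (c4 features)) (List.foldl (passStep c3)
      (List.foldl (passStep c2) (List.foldl (passStep c1) (List.replicate features.length true)
      (PySem.List.enumerate features 0)) (PySem.List.enumerate features 0))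
      (PySem.List.enumerate features 0)) (PySem.List.enumerate features 0))
      = (List.range features.length).map (fun k => keepP features k) := by
    apply List.ext_getElem
    · rw [l4]; simp
    · intro k h1 h2
      have hkn : k < features.length := by rw [l4] at h1; omega
      have hg := key k hkn
      rw [PySem.List.pyGetD_natCast, List.getD_eq_getElem _ _ h1] at hg
      rw [hg, List.getElem_map, List.getElem_range]
  rw [hlist, List.foldl_map]

theorem B_eq (features : List (List (String × String))) :
    count_intact_TE_count_alt features
      = (List.range features.length).foldl
          (fun acc k => if keepB features k then acc + 1 else acc) 0 := by
  simp only [count_intact_TE_count_alt]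
  rw [PySem.List.enumerate_eq_map_pyRange features [], List.foldl_map]
  rw [show PySem.List.len features = ((features.length : Nat) : Int) from rfl]
  rw [PySem.List.pyRange_zero_nat, List.foldl_map]
  apply PySem.List.foldl_congr_mem
  intro acc k hk
  rw [List.mem_range] at hk
  simp only [PySem.List.pyGetD_natCast]
  unfold keepB candAny
  by_cases hG : PySem.Str.isIn "gene" (PySem.Str.lower (PySem.List.pyGetD (splitSemi (nameOf (features.getD k []))) 0 "")) = true <;>
  by_cases hS : PySem.Str.isIn "_SOLO" (PySem.List.pyGetD (splitSemi (nameOf (features.getD k []))) 0 "") = true <;>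
  by_cases hQ : 1 < (splitSemi (nameOf (features.getD k []))).length <;>
  by_cases hC : PySem.Str.isIn "CUT_BY" (PySem.List.pyGetD (splitSemi (nameOf (features.getD k []))) 1 "") = true <;>
  simp only [hG, hS, hQ, hC, decide_true, decide_false, Bool.false_and, Bool.true_and,
    Bool.not_true, Bool.not_false, Bool.true_or, Bool.or_true, Bool.false_or, Bool.or_false] <;>
  (try simp only [Bool.not_false, Bool.not_true, Bool.false_eq_true, Bool.true_eq_false, if_true, if_false]) <;>
  first
  | rfl
  | (rw [if_not_flip])

theorem keep_eq (features : List (List (String × String))) (k : Nat)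
    (hk : k < features.length) (hpre : Pre_count_intact_TE_count features) :
    keepB features k = keepP features k := by
  unfold keepB keepP
  by_cases hG : PySem.Str.isIn "gene" (PySem.Str.lower (PySem.List.pyGetD (splitSemi (nameOf (features.getD k []))) 0 "")) = true <;>
  by_cases hS : PySem.Str.isIn "_SOLO" (PySem.List.pyGetD (splitSemi (nameOf (features.getD k []))) 0 "") = true <;>
  by_cases hQ : 1 < (splitSemi (nameOf (features.getD k []))).length <;>
  by_cases hC : PySem.Str.isIn "CUT_BY" (PySem.List.pyGetD (splitSemi (nameOf (features.getD k []))) 1 "") = true <;>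
  simp only [hG, hS, hQ, hC, decide_true, decide_false, Bool.false_and, Bool.true_and,
    Bool.not_true, Bool.not_false, Bool.and_false, Bool.and_true] <;>
  try rfl
  -- surviving case: ¬G, ¬S, Q, ¬C
  simp only [Bool.not_eq_true] at hG hS hC
  have hr : reaches3 (features.getD k []) = true := by
    unfold reaches3
    rw [hG, hS, hC]
    simpa using hQ
  rw [cand_eq_nb features k hk hpre hr]

-- ===== VERDICT (by name: the statement is the Claim_ definition above) =====
theorem count_intact_TE_count_spec : Claim_equal_count_intact_TE_count := by
  intro features _ hpre
  unfold Spec_count_intact_TE_count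
  rw [A_eq, B_eq]
  apply PySem.List.foldl_congr_mem
  intro acc k hkmem
  rw [List.mem_range] at hkmem
  rw [keep_eq features k hkmem hpre]
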